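-- pv_equiv track=rewrite | github.com/Qu-Xiangjun/AutoSparse | program_sampling/spmm_schedule_gen.py | check_lreorder
-- ===== SOURCE A (Python) =====
-- def check_lreorder(vars_mode : dict, freordered_vars_lsplit : list, lreordered_vars : list):
--     # The order between sparse array axes is fixed.
--     for idx in range(1, len(freordered_vars_lsplit)):
--         item0 = freordered_vars_lsplit[idx - 1]
--         item1 = freordered_vars_lsplit[idx]
--         item0_index = lreordered_vars.index(item0)
--         item1_index = lreordered_vars.index(item1)
--         if item0_index > item1_index:
--             return False
--     return True
-- ===== SOURCE B (Python) =====
-- def check_lreorder(vars_mode: dict, freordered_vars_lsplit: list, lreordered_vars: list):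
--     # Build the position of every item once, then ask whether the position
--     # sequence is non-decreasing by comparing it with its sorted copy.
--     idxs = [lreordered_vars.index(x) for x in freordered_vars_lsplit]
--     return idxs == sorted(idxs)
-- ===== Notes on version B (the rewrite author's own statement) =====
-- stated objective: simpler
-- what changed: Replaces A's index-driven early-returning pairwise scan over range(1,len) with building the position list once and comparing it with its sorted copy.
-- outside the precondition, e.g. on check_lreorder({}, [2, 1, 9], [1, 2]): A returns False, B raises ValueError; on check_lreorder({}, [5], []): A returns True, B raises ValueError
import Mathlib
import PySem

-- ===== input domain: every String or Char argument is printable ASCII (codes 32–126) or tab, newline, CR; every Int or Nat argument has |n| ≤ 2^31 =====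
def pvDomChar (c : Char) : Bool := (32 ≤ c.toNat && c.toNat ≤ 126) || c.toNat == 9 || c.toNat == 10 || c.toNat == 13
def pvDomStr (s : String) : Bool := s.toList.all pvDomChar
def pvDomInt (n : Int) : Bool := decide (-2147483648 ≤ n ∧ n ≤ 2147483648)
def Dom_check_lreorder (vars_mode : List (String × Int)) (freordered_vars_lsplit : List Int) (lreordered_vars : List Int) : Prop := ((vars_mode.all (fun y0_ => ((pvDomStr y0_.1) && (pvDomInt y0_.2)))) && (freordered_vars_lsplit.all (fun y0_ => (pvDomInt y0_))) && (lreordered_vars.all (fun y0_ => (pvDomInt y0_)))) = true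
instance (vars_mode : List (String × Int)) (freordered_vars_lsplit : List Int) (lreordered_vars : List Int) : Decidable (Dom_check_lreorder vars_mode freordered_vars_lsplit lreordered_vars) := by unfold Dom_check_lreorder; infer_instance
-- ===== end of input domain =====

-- B replaces A's early-returning pairwise scan over range(1, len) by building the
-- position list once and comparing it with its sorted copy (objective: simpler).

-- ===== PORT A =====
-- loop over idx ∈ range(1, len(freordered_vars_lsplit)) with early return False
def pvALoop (f l : List Int) : List Int → Bool
  | [] => true
  | idx :: rest =>
      let item0 := PySem.List.pyGetD f (idx - 1) 0
      let item1 := PySem.List.pyGetD f idx 0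
      let item0_index : Int := ((PySem.List.index? l item0).getD 0 : Nat)
      let item1_index : Int := ((PySem.List.index? l item1).getD 0 : Nat)
      if item0_index > item1_index then false else pvALoop f l rest

def check_lreorder (vars_mode : List (String × Int)) (freordered_vars_lsplit : List Int) (lreordered_vars : List Int) : Bool :=
  pvALoop freordered_vars_lsplit lreordered_vars
    (PySem.List.pyRange 1 (freordered_vars_lsplit.length : Int))

-- ===== PORT B =====
def check_lreorder_alt (vars_mode : List (String × Int)) (freordered_vars_lsplit : List Int) (lreordered_vars : List Int) : Bool :=
  let idxs : List Int := freordered_vars_lsplit.map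
    (fun x => ((PySem.List.index? lreordered_vars x).getD 0 : Nat))
  decide (idxs = PySem.List.sorted idxs (fun x => x))

-- ===== PRECONDITION & SPEC =====
-- Pre_ excludes inputs with an element of freordered_vars_lsplit missing from
-- lreordered_vars: there A's incremental scan may return False (or True for a
-- short list) before reaching the missing element, while B's full index build
-- raises ValueError first.
def Pre_check_lreorder (vars_mode : List (String × Int)) (freordered_vars_lsplit : List Int) (lreordered_vars : List Int) : Prop :=
  ∀ x ∈ freordered_vars_lsplit, x ∈ lreordered_vars
instance (vars_mode : List (String × Int)) (freordered_vars_lsplit : List Int) (lreordered_vars : List Int) : Decidable (Pre_check_lreorder vars_mode freordered_vars_lsplit lreordered_vars) := by unfold Pre_check_lreorder; infer_instance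

def pvWitness_check_lreorder : (List (String × Int)) × List Int × List Int :=
  ([("i", 0)], [1, 2], [1, 2])

def Spec_check_lreorder (vars_mode : List (String × Int)) (freordered_vars_lsplit : List Int) (lreordered_vars : List Int) (out : Bool) : Prop := out = check_lreorder_alt vars_mode freordered_vars_lsplit lreordered_vars
instance (vars_mode : List (String × Int)) (freordered_vars_lsplit : List Int) (lreordered_vars : List Int) (out : Bool) : Decidable (Spec_check_lreorder vars_mode freordered_vars_lsplit lreordered_vars out) := by unfold Spec_check_lreorder; infer_instance

-- ===== CLAIM (what is proved, stated in full; the proofs are below) =====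
def Claim_equal_check_lreorder : Prop := ∀ (vars_mode : List (String × Int)) (freordered_vars_lsplit : List Int) (lreordered_vars : List Int), Dom_check_lreorder vars_mode freordered_vars_lsplit lreordered_vars → Pre_check_lreorder vars_mode freordered_vars_lsplit lreordered_vars → Spec_check_lreorder vars_mode freordered_vars_lsplit lreordered_vars (check_lreorder vars_mode freordered_vars_lsplit lreordered_vars)

-- ===== LEMMAS AND PROOFS =====

-- A's loop returns true iff no index in the list violates the order.
theorem pvALoop_eq_true_iff (f l : List Int) (r : List Int) :
    pvALoop f l r = true ↔
      ∀ idx ∈ r,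
        ((PySem.List.index? l (PySem.List.pyGetD f (idx - 1) 0)).getD 0 : Int) ≤
        ((PySem.List.index? l (PySem.List.pyGetD f idx 0)).getD 0 : Int) := by
  induction r with
  | nil => simp [pvALoop]
  | cons idx rest ih =>
      simp only [pvALoop, List.mem_cons]
      split_ifs with h
      · constructor
        · intro hfalse; cases hfalse
        · intro hall
          exact absurd (hall idx (Or.inl rfl)) (by omega)
      · rw [ih]
        constructor
        · intro hall x hx
          rcases hx with rfl | hx
          · omega
          · exact hall x hx
        · intro hall x hx; exact hall x (Or.inr hx)

-- B's comparison with the sorted copy is exactly "pairwise non-decreasing".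
theorem pvSorted_eq_iff (idxs : List Int) :
    (idxs = PySem.List.sorted idxs (fun x => x)) ↔
      List.Pairwise (· ≤ ·) idxs := by
  constructor
  · intro h
    have := PySem.List.sorted_pairwise idxs (fun x => x)
    rw [← h] at this
    exact this
  · intro h
    exact (PySem.List.sorted_eq_self_of_pairwise idxs (fun x => x) h).symm

theorem pvPairwise_map_iff (f l : List Int) :
    List.Pairwise (· ≤ ·) (f.map (fun x => (((PySem.List.index? l x).getD 0 : Nat) : Int))) ↔
      ∀ (i : Nat), i + 1 < f.length →
        (((PySem.List.index? l f[i]!).getD 0 : Nat) : Int) ≤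
        (((PySem.List.index? l f[i+1]!).getD 0 : Nat) : Int) := by
  rw [← List.isChain_iff_pairwise, List.isChain_iff_getElem]
  constructor
  · intro h i hi
    have hi' : i + 1 < (f.map (fun x => (((PySem.List.index? l x).getD 0 : Nat) : Int))).length := by
      simpa using hi
    have := h i hi'
    simpa [List.getElem_map, List.getElem!_eq_getElem?_getD,
      List.getElem?_eq_getElem (by omega : i < f.length),
      List.getElem?_eq_getElem hi] using this
  · intro h i hi
    have hlen : i + 1 < f.length := by simpa using hi
    have := h i hlen
    simpa [List.getElem_map, List.getElem!_eq_getElem?_getD,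
      List.getElem?_eq_getElem (by omega : i < f.length),
      List.getElem?_eq_getElem hlen] using this

theorem pvMain (f l : List Int) :
    pvALoop f l (PySem.List.pyRange 1 (f.length : Int)) =
      decide ((f.map (fun x => (((PySem.List.index? l x).getD 0 : Nat) : Int))) =
        PySem.List.sorted (f.map (fun x => (((PySem.List.index? l x).getD 0 : Nat) : Int))) (fun x => x)) := by
  rcases hb : pvALoop f l (PySem.List.pyRange 1 (f.length : Int)) with _ | _
  · symm
    rw [decide_eq_false_iff_not]
    intro hsorted
    have hpw := (pvSorted_eq_iff _).mp hsorted
    have hall := (pvPairwise_map_iff f l).mp hpw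
    have : pvALoop f l (PySem.List.pyRange 1 (f.length : Int)) = true := by
      rw [pvALoop_eq_true_iff]
      intro idx hidx
      rw [PySem.List.mem_pyRange_one] at hidx
      obtain ⟨h1, h2⟩ := hidx
      -- idx = i+1 for i = (idx-1).toNat
      set i : Nat := (idx - 1).toNat with hi
      have hidx_eq : idx = (i : Int) + 1 := by omega
      have hlen : i + 1 < f.length := by omega
      have e0 : PySem.List.pyGetD f (idx - 1) 0 = f[i]! := by
        rw [PySem.List.pyGetD_of_nonneg f 0 (by omega)]
        simp [List.getD_eq_getElem?_getD, List.getElem!_eq_getElem?_getD, hi]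
      have e1 : PySem.List.pyGetD f idx 0 = f[i+1]! := by
        rw [PySem.List.pyGetD_of_nonneg f 0 (by omega)]
        have : idx.toNat = i + 1 := by omega
        simp [List.getD_eq_getElem?_getD, List.getElem!_eq_getElem?_getD, this]
      rw [e0, e1]
      exact hall i hlen
    rw [hb] at this; cases this
  · symm
    rw [decide_eq_true_iff]
    rw [pvSorted_eq_iff, pvPairwise_map_iff]
    intro i hlen
    have hall := (pvALoop_eq_true_iff f l _).mp hb
    have hmem : ((i : Int) + 1) ∈ PySem.List.pyRange 1 (f.length : Int) := by
      rw [PySem.List.mem_pyRange_one]; omega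
    have := hall ((i : Int) + 1) hmem
    have e0 : PySem.List.pyGetD f ((i : Int) + 1 - 1) 0 = f[i]! := by
      rw [PySem.List.pyGetD_of_nonneg f 0 (by omega)]
      have : ((i : Int) + 1 - 1).toNat = i := by omega
      simp [List.getD_eq_getElem?_getD, List.getElem!_eq_getElem?_getD, this]
    have e1 : PySem.List.pyGetD f ((i : Int) + 1) 0 = f[i+1]! := by
      rw [PySem.List.pyGetD_of_nonneg f 0 (by omega)]
      have : ((i : Int) + 1).toNat = i + 1 := by omega
      simp [List.getD_eq_getElem?_getD, List.getElem!_eq_getElem?_getD, this]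
    rw [e0, e1] at this
    exact this

-- ===== VERDICT (by name: the statement is the Claim_ definition above) =====
theorem check_lreorder_spec : Claim_equal_check_lreorder := by
  intro vars_mode f l _ _
  unfold Spec_check_lreorder check_lreorder check_lreorder_alt
  exact pvMain f l
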